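-- pv_equiv track=rewrite | github.com/ccctw-ma/leetcode | src/Medium/ArrayTest/canChoose.py | canChoose
-- ===== SOURCE A (Python) =====
-- from typing import List, Tuple, Union, Optional
--
-- def canChoose(groups: List[List[int]], nums: List[int]) -> bool:
--
--     m, n = len(groups), len(nums)
--     idx = 0
--     i = 0
--     while idx < n:
--
--         if idx + len(groups[i]) <= n and nums[idx:idx + len(groups[i])] == groups[i]:
--             idx = idx + len(groups[i])
--             i += 1
--         else:
--             idx += 1
--         if i == m:
--             break
--     return i == m
-- ===== SOURCE B (Python) =====
-- def canChoose(groups, nums):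
--     # Back-to-front greedy: place each group, from the last to the first, at the
--     # latest position that ends at or before the previously placed group's start.
--     end = len(nums)
--     for g in reversed(groups):
--         s = end - len(g)
--         while s >= 0 and nums[s:s + len(g)] != g:
--             s -= 1
--         if s < 0:
--             return False
--         end = s
--     return True
-- ===== Notes on version B (the rewrite author's own statement) =====
-- stated objective: alternative
-- what changed: A greedily walks a single pointer left-to-right matching groups in order; B processes the groups in reverse, placing each at the latest occurrence ending before the previously placed one - a back-to-front greedy whose equality with A rests on an exchange argument (both succeed iff an ordered disjoint placement exists).
-- outside the precondition, e.g. on canChoose([[1], []], [1]): A returns False, B returns True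
import Mathlib
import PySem

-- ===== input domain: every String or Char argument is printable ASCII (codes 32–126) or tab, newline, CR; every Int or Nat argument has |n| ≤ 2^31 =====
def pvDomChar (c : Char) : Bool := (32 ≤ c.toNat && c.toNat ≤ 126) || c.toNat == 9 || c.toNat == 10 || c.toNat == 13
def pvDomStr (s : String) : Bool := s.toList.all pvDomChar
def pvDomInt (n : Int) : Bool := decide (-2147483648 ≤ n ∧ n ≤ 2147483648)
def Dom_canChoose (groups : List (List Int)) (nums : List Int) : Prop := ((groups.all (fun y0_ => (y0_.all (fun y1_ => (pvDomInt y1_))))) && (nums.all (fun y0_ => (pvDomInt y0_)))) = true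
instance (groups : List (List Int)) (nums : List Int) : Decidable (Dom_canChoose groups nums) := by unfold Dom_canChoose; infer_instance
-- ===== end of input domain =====

-- B replaces A's left-to-right one-pointer scan by a back-to-front greedy: groups are
-- processed in REVERSE order, each matched at the LATEST position ending before the
-- previous one (objective: alternative algorithm; equality needs an exchange argument).

-- ===== PORT A =====
-- Literal port of A's while-loop; idx, i are the loop variables (always ≥ 0 in Python).
def canChooseGoA (groups : List (List Int)) (nums : List Int) (idx i : Nat) : Bool :=
  if _h : idx < nums.length then
    match _hg : groups[i]? with
    | none => false  -- Python raises IndexError here (i ≥ len(groups)); excluded by Pre_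
    | some g =>
      if idx + g.length ≤ nums.length ∧
          PySem.List.slice nums (some (idx : Int)) (some ((idx : Int) + (g.length : Int))) = g then
        if i + 1 = groups.length then true  -- break, then return i == m
        else canChooseGoA groups nums (idx + g.length) (i + 1)
      else
        if i = groups.length then true
        else canChooseGoA groups nums (idx + 1) i
  else decide (i = groups.length)
termination_by (nums.length - idx) + (groups.length - i)
decreasing_by
  · have : i < groups.length := by
      have := List.getElem?_eq_some_iff.mp _hg
      exact this.1
    omega
  · omega

def canChoose (groups : List (List Int)) (nums : List Int) : Bool :=
  canChooseGoA groups nums 0 0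

-- ===== PORT B =====
-- Port of Source B's inner while-loop: latest s' ≤ s with nums[s':s'+len g] = g.
def searchBack (nums g : List Int) (s : Int) : Option Int :=
  if _h : 0 ≤ s then
    if PySem.List.slice nums (some s) (some (s + (g.length : Int))) = g then some s
    else searchBack nums g (s - 1)
  else none
termination_by (s + 1).toNat
decreasing_by omega

-- Port of Source B's for-loop over reversed(groups); e is the variable 'end'.
def canChooseGoBRev (nums : List Int) (gs : List (List Int)) (e : Int) : Bool :=
  match gs with
  | [] => true
  | g :: rest =>
    match searchBack nums g (e - (g.length : Int)) with
    | none => false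
    | some p => canChooseGoBRev nums rest p

def canChoose_alt (groups : List (List Int)) (nums : List Int) : Bool :=
  canChooseGoBRev nums groups.reverse ((nums.length : Int))

-- ===== PRECONDITION & SPEC =====
-- Pre_ excludes (a) groups = [] with nums ≠ [], where A raises IndexError, and
-- (b) inputs containing an empty group, a corner outside the task's constraints where
-- whether an empty subarray can still be chosen once the scan has reached the end of
-- nums is unspecified and A's and B's answers are both defensible.
def Pre_canChoose (groups : List (List Int)) (nums : List Int) : Prop :=
  (groups ≠ [] ∨ nums = []) ∧ ∀ g ∈ groups, g ≠ []
instance (groups : List (List Int)) (nums : List Int) : Decidable (Pre_canChoose groups nums) := by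
  unfold Pre_canChoose; infer_instance

def pvWitness_canChoose : List (List Int) × List Int := ([[1, 2], [3]], [0, 1, 2, 3])

def Spec_canChoose (groups : List (List Int)) (nums : List Int) (out : Bool) : Prop :=
  out = canChoose_alt groups nums
instance (groups : List (List Int)) (nums : List Int) (out : Bool) : Decidable (Spec_canChoose groups nums out) := by unfold Spec_canChoose; infer_instance

-- ===== CLAIM (what is proved, stated in full; the proofs are below) =====
def Claim_equal_canChoose : Prop := ∀ (groups : List (List Int)) (nums : List Int), Dom_canChoose groups nums → Pre_canChoose groups nums → Spec_canChoose groups nums (canChoose groups nums)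

-- ===== LEMMAS AND PROOFS =====

-- g occurs in nums at (0-based) position p.
def MatchAt (nums g : List Int) (p : Nat) : Prop :=
  p + g.length ≤ nums.length ∧ (nums.drop p).take g.length = g

-- groups placed disjointly in order, positions ≥ s, all ends ≤ e.
def PlaceB (nums : List Int) : List (List Int) → Nat → Int → Prop
  | [], _, _ => True
  | g :: gs, s, e => ∃ p : Nat, s ≤ p ∧ (p : Int) + g.length ≤ e ∧ MatchAt nums g p ∧
      PlaceB nums gs (p + g.length) e

-- reversed groups placed right-to-left, each ending ≤ e.
def PlaceR (nums : List Int) : List (List Int) → Int → Prop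
  | [], _ => True
  | g :: gs, e => ∃ p : Nat, (p : Int) + g.length ≤ e ∧ MatchAt nums g p ∧ PlaceR nums gs p

-- ---- earliest-occurrence greedy (proof device mirroring A's scan) ----
def searchFrom (nums g : List Int) (s : Nat) : Option Nat :=
  if _h : s + g.length ≤ nums.length then
    if PySem.List.slice nums (some (s : Int)) (some ((s : Int) + (g.length : Int))) = g then some s
    else searchFrom nums g (s + 1)
  else none
termination_by nums.length + 1 - s

def canChooseGoE (nums : List Int) (gs : List (List Int)) (s : Nat) : Bool :=
  match gs with
  | [] => true
  | g :: rest =>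
    match searchFrom nums g s with
    | none => false
    | some p => canChooseGoE nums rest (p + g.length)

-- One-step unfolding of the earliest-greedy loop, phrased to mirror A's branching.
theorem goE_cons (nums g : List Int) (rest : List (List Int)) (s : Nat) :
    canChooseGoE nums (g :: rest) s =
      if s + g.length ≤ nums.length then
        if PySem.List.slice nums (some (s : Int)) (some ((s : Int) + (g.length : Int))) = g then
          canChooseGoE nums rest (s + g.length)
        else canChooseGoE nums (g :: rest) (s + 1)
      else false := by
  conv_lhs => rw [canChooseGoE, searchFrom]
  split_ifs with h1 h2
  · simp
  · rw [canChooseGoE]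
  · simp

theorem goA_eq_goE (groups : List (List Int)) (nums : List Int) (idx i : Nat)
    (hne : ∀ g ∈ groups, g ≠ []) (hi : i < groups.length) :
    canChooseGoA groups nums idx i = canChooseGoE nums (groups.drop i) idx := by
  induction idx, i using canChooseGoA.induct groups nums with
  | case1 idx i hidx hg =>
    have := List.getElem?_eq_none_iff.mp hg
    omega
  | case2 idx i hidx g hg hmatch hbreak =>
    have hdrop : groups.drop i = g :: groups.drop (i + 1) := by
      rw [List.drop_eq_getElem_cons hi]
      simp [List.getElem?_eq_some_iff.mp hg |>.2]
    rw [canChooseGoA]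
    simp only [hidx, dif_pos]
    split
    next heq => rw [hg] at heq; cases heq
    next g' heq =>
      rw [hg] at heq; injection heq with e; subst e
      rw [if_pos hmatch, if_pos hbreak, hdrop, goE_cons]
      have hrest : groups.drop (i + 1) = [] := by
        rw [List.drop_eq_nil_iff]; omega
      simp [hmatch.1, hmatch.2, hrest, canChooseGoE]
  | case3 idx i hidx g hg hmatch hbreak ih =>
    have him : i + 1 < groups.length := by
      have := (List.getElem?_eq_some_iff.mp hg).1
      omega
    have hdrop : groups.drop i = g :: groups.drop (i + 1) := by
      rw [List.drop_eq_getElem_cons hi]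
      simp [List.getElem?_eq_some_iff.mp hg |>.2]
    rw [canChooseGoA]
    simp only [hidx, dif_pos]
    split
    next heq => rw [hg] at heq; cases heq
    next g' heq =>
      rw [hg] at heq; injection heq with e; subst e
      rw [if_pos hmatch, if_neg hbreak, hdrop, goE_cons]
      simp only [hmatch.1, if_pos, hmatch.2]
      exact ih him
  | case4 idx hidx g hmatch hg =>
    have := (List.getElem?_eq_some_iff.mp hg).1
    omega
  | case5 idx i hidx g hg hmatch hstop ih =>
    have hdrop : groups.drop i = g :: groups.drop (i + 1) := by
      rw [List.drop_eq_getElem_cons hi]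
      simp [List.getElem?_eq_some_iff.mp hg |>.2]
    rw [canChooseGoA]
    simp only [hidx, dif_pos]
    split
    next heq => rw [hg] at heq; cases heq
    next g' heq =>
      rw [hg] at heq; injection heq with e; subst e
      rw [if_neg hmatch, if_neg hstop, ih hi, hdrop]
      by_cases hlen : idx + g.length ≤ nums.length
      · have hsl : ¬ PySem.List.slice nums (some (idx : Int)) (some ((idx : Int) + (g.length : Int))) = g := by
          intro hsl; exact hmatch ⟨hlen, hsl⟩
        conv_rhs => rw [goE_cons]
        simp [hlen, hsl]
      · have hB1 : canChooseGoE nums (g :: groups.drop (i + 1)) (idx + 1) = false := by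
          rw [goE_cons]
          have h2 : ¬ idx + 1 + g.length ≤ nums.length := by omega
          simp [h2]
        conv_rhs => rw [goE_cons]
        simp [hlen, hB1]
  | case6 idx i hidx =>
    have hdrop : groups.drop i = groups[i] :: groups.drop (i + 1) :=
      List.drop_eq_getElem_cons hi
    rw [canChooseGoA, hdrop, goE_cons]
    have hgne : groups[i] ≠ [] := hne _ (List.getElem_mem hi)
    have hglen : 0 < groups[i].length := List.length_pos_iff.mpr hgne
    have hlt : ¬ idx + groups[i].length ≤ nums.length := by omega
    simp [hidx, hlt]
    omega

-- slice at a Nat position ↔ MatchAt's drop/take form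
theorem slice_eq_matchSlice (nums g : List Int) (p : Nat) :
    PySem.List.slice nums (some (p : Int)) (some ((p : Int) + (g.length : Int))) =
      (nums.drop p).take g.length := by
  exact PySem.List.slice_natCast_add nums p g.length

theorem matchAt_of_slice (nums g : List Int) (p : Nat) (hne : g ≠ [])
    (h : PySem.List.slice nums (some (p : Int)) (some ((p : Int) + (g.length : Int))) = g) :
    MatchAt nums g p := by
  rw [slice_eq_matchSlice] at h
  refine ⟨?_, h⟩
  have hl := congrArg List.length h
  simp [List.length_take, List.length_drop] at hl
  have : 0 < g.length := List.length_pos_iff.mpr hne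
  omega

-- ---- searchFrom: soundness and minimality ----
theorem searchFrom_some (nums g : List Int) (s p : Nat)
    (h : searchFrom nums g s = some p) : s ≤ p ∧ MatchAt nums g p := by
  induction s using searchFrom.induct nums g with
  | case1 s hlen hsl =>
    rw [searchFrom, dif_pos hlen, if_pos hsl] at h
    cases h
    rw [slice_eq_matchSlice] at hsl
    exact ⟨le_refl _, hlen, hsl⟩
  | case2 s hlen hsl ih =>
    rw [searchFrom, dif_pos hlen, if_neg hsl] at h
    have := ih h
    exact ⟨by omega, this.2⟩
  | case3 s hlen =>
    rw [searchFrom, dif_neg hlen] at h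
    cases h

theorem searchFrom_min (nums g : List Int) (s p : Nat)
    (hm : MatchAt nums g p) (hsp : s ≤ p) :
    ∃ p0, searchFrom nums g s = some p0 ∧ p0 ≤ p := by
  induction s using searchFrom.induct nums g with
  | case1 s hlen hsl =>
    exact ⟨s, by rw [searchFrom, dif_pos hlen, if_pos hsl], hsp⟩
  | case2 s hlen hsl ih =>
    have hne : s ≠ p := by
      intro he; subst he
      exact hsl (by rw [slice_eq_matchSlice]; exact hm.2)
    obtain ⟨p0, h0, hle⟩ := ih (by omega)
    exact ⟨p0, by rw [searchFrom, dif_pos hlen, if_neg hsl]; exact h0, hle⟩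
  | case3 s hlen =>
    exact absurd hm.1 (by omega)

-- ---- searchBack: soundness and maximality ----
theorem searchBack_some (nums g : List Int) (s p : Int)
    (h : searchBack nums g s = some p) :
    0 ≤ p ∧ p ≤ s ∧
      PySem.List.slice nums (some p) (some (p + (g.length : Int))) = g := by
  induction s using searchBack.induct nums g with
  | case1 s hnn hsl =>
    rw [searchBack, dif_pos hnn, if_pos hsl] at h
    cases h
    exact ⟨hnn, le_refl _, hsl⟩
  | case2 s hnn hsl ih =>
    rw [searchBack, dif_pos hnn, if_neg hsl] at h
    have := ih h
    exact ⟨this.1, by omega, this.2.2⟩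
  | case3 s hnn =>
    rw [searchBack, dif_neg hnn] at h
    cases h

theorem searchBack_max (nums g : List Int) (s : Int) (q : Nat)
    (hm : MatchAt nums g q) (hqs : (q : Int) ≤ s) :
    ∃ p, searchBack nums g s = some p ∧ (q : Int) ≤ p := by
  induction s using searchBack.induct nums g with
  | case1 s hnn hsl =>
    exact ⟨s, by rw [searchBack, dif_pos hnn, if_pos hsl], hqs⟩
  | case2 s hnn hsl ih =>
    have hne : (q : Int) ≠ s := by
      intro he
      apply hsl
      rw [← he]
      rw [slice_eq_matchSlice]; exact hm.2
    obtain ⟨p, hp, hle⟩ := ih (by omega)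
    exact ⟨p, by rw [searchBack, dif_pos hnn, if_neg hsl]; exact hp, hle⟩
  | case3 s hnn =>
    exact absurd hqs (by omega)

-- ---- monotonicity of the placement predicates ----
theorem placeB_mono (nums : List Int) (gs : List (List Int)) (s s' : Nat) (e : Int)
    (h : PlaceB nums gs s' e) (hss : s ≤ s') : PlaceB nums gs s e := by
  cases gs with
  | nil => trivial
  | cons g rest =>
    obtain ⟨p, h1, h2, h3, h4⟩ := h
    exact ⟨p, by omega, h2, h3, h4⟩

theorem placeR_mono (nums : List Int) (gs : List (List Int)) (e e' : Int)
    (h : PlaceR nums gs e) (hee : e ≤ e') : PlaceR nums gs e' := by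
  cases gs with
  | nil => trivial
  | cons g rest =>
    obtain ⟨p, h1, h2, h3⟩ := h
    exact ⟨p, by omega, h2, h3⟩

-- ---- earliest greedy computes exactly "a placement exists" ----
theorem goE_iff_placeB (nums : List Int) (gs : List (List Int)) (s : Nat) :
    canChooseGoE nums gs s = true ↔ PlaceB nums gs s (nums.length : Int) := by
  induction gs generalizing s with
  | nil => simp [canChooseGoE, PlaceB]
  | cons g rest ih =>
    rw [canChooseGoE]
    constructor
    · intro h
      cases hsf : searchFrom nums g s with
      | none => rw [hsf] at h; cases h
      | some p =>
        rw [hsf] at h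
        obtain ⟨hsp, hm⟩ := searchFrom_some nums g s p hsf
        exact ⟨p, hsp, by have := hm.1; omega, hm, (ih _).mp h⟩
    · rintro ⟨p, hsp, _, hm, hrest⟩
      obtain ⟨p0, h0, hle⟩ := searchFrom_min nums g s p hm hsp
      rw [h0]
      obtain ⟨_, hm0⟩ := searchFrom_some nums g s p0 h0
      exact (ih _).mpr (placeB_mono nums rest _ (p + g.length) _ hrest (by omega))

-- ---- backwards greedy computes exactly "a reverse placement exists" ----
theorem goBRev_iff_placeR (nums : List Int) (gs : List (List Int)) (e : Int)
    (hne : ∀ g ∈ gs, g ≠ []) :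
    canChooseGoBRev nums gs e = true ↔ PlaceR nums gs e := by
  induction gs generalizing e with
  | nil => simp [canChooseGoBRev, PlaceR]
  | cons g rest ih =>
    have hg : g ≠ [] := hne g (by simp)
    have hner : ∀ g' ∈ rest, g' ≠ [] := fun g' h => hne g' (by simp [h])
    rw [canChooseGoBRev]
    constructor
    · intro h
      cases hsb : searchBack nums g (e - (g.length : Int)) with
      | none => rw [hsb] at h; cases h
      | some p =>
        rw [hsb] at h
        obtain ⟨hp0, hps, hsl⟩ := searchBack_some nums g _ p hsb
        have hpt : ((p.toNat : Int)) = p := Int.toNat_of_nonneg hp0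
        have hm : MatchAt nums g p.toNat := by
          apply matchAt_of_slice nums g p.toNat hg
          rw [hpt]; exact hsl
        refine ⟨p.toNat, by omega, hm, ?_⟩
        have := (ih _ hner).mp h
        exact placeR_mono nums rest p _ this (by omega)
    · rintro ⟨q, hqe, hm, hrest⟩
      obtain ⟨p, hp, hqp⟩ := searchBack_max nums g (e - (g.length : Int)) q hm (by omega)
      rw [hp]
      exact (ih _ hner).mpr (placeR_mono nums rest q p hrest hqp)

-- ---- bridge: a reverse placement of gs.reverse is a placement of gs ----
theorem placeB_append_one (nums : List Int) (xs : List (List Int)) (g : List Int)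
    (s : Nat) (e : Int) :
    PlaceB nums (xs ++ [g]) s e ↔
      ∃ p : Nat, s ≤ p ∧ (p : Int) + g.length ≤ e ∧ MatchAt nums g p ∧
        PlaceB nums xs s (p : Int) := by
  induction xs generalizing s with
  | nil => simp only [List.nil_append, PlaceB]
  | cons x xs ih =>
    simp only [List.cons_append, PlaceB]
    constructor
    · rintro ⟨q, hq1, hq2, hq3, hrest⟩
      obtain ⟨p, hp1, hp2, hp3, hxs⟩ := (ih _).mp hrest
      exact ⟨p, by omega, hp2, hp3,
        ⟨q, hq1, by have := hp3.1; omega, hq3, hxs⟩⟩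
    · rintro ⟨p, hp1, hp2, hp3, q, hq1, hq2, hq3, hxs⟩
      have hgl : (0 : Int) ≤ g.length := by positivity
      exact ⟨q, hq1, by omega, hq3, (ih _).mpr ⟨p, by omega, hp2, hp3, hxs⟩⟩

theorem placeR_reverse_iff (nums : List Int) (gs : List (List Int)) (e : Int) :
    PlaceR nums gs e ↔ PlaceB nums gs.reverse 0 e := by
  induction gs generalizing e with
  | nil => simp [PlaceR, PlaceB]
  | cons g rest ih =>
    simp only [List.reverse_cons, PlaceR, placeB_append_one]
    constructor
    · rintro ⟨p, h1, h2, h3⟩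
      exact ⟨p, Nat.zero_le _, h1, h2, (ih _).mp h3⟩
    · rintro ⟨p, _, h1, h2, h3⟩
      exact ⟨p, h1, h2, (ih _).mpr h3⟩

-- ===== VERDICT (by name: the statement is the Claim_ definition above) =====
theorem canChoose_spec : Claim_equal_canChoose := by
  intro groups nums _hdom hpre
  unfold Spec_canChoose canChoose canChoose_alt
  match hgs : groups with
  | [] =>
    have hnil : nums = [] := by
      rcases hpre.1 with h | h
      · exact absurd rfl h
      · exact h
    subst hnil
    rw [canChooseGoA]
    simp [canChooseGoBRev]
  | g :: rest =>
    have hA : canChooseGoA (g :: rest) nums 0 0 = canChooseGoE nums (g :: rest) 0 :=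
      goA_eq_goE (g :: rest) nums 0 0 hpre.2 (by simp)
    have hiff : canChooseGoE nums (g :: rest) 0 = true ↔
        canChooseGoBRev nums (g :: rest).reverse ((nums.length : Int)) = true := by
      rw [goE_iff_placeB, goBRev_iff_placeR nums _ _
        (by intro g' hg'; exact hpre.2 g' (List.mem_reverse.mp hg')),
        placeR_reverse_iff, List.reverse_reverse]
    rw [hA]
    cases hE : canChooseGoE nums (g :: rest) 0 <;>
      cases hB : canChooseGoBRev nums (g :: rest).reverse ((nums.length : Int)) <;>
      simp_all
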